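-- pv_equiv track=rewrite | github.com/Skyscimitar/RIW | cacm_part1/VectorialModel.py | search_result
-- ===== SOURCE A (Python) =====
-- from copy import deepcopy
--
-- def search_result(cosines_list, posting):
--
--     sorted_cosines = deepcopy(cosines_list)
--     sorted_cosines.sort(reverse=True)
--     result = []
--     while (len(sorted_cosines) > 0):
--         indices = [i for i,x in enumerate(cosines_list) if x == sorted_cosines[0]]
--         doc_ids = [posting[i] for i in indices]
--         result += doc_ids
--         sorted_cosines = sorted_cosines[len(doc_ids):]
--
--     return result
-- ===== SOURCE B (Python) =====
-- def search_result(cosines_list, posting):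
--     groups = {}
--     for c, p in zip(cosines_list, posting):
--         groups[c] = groups.get(c, []) + [p]
--     result = []
--     for c in sorted(groups, reverse=True):
--         result += groups[c]
--     return result
-- ===== Notes on version B (the rewrite author's own statement) =====
-- stated objective: simpler
-- what changed: One pass grouping postings by cosine value in a dict, then one walk over the distinct keys sorted descending, instead of sorting a copy and repeatedly rescanning the whole cosine list for the indices of each value.
import Mathlib
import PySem

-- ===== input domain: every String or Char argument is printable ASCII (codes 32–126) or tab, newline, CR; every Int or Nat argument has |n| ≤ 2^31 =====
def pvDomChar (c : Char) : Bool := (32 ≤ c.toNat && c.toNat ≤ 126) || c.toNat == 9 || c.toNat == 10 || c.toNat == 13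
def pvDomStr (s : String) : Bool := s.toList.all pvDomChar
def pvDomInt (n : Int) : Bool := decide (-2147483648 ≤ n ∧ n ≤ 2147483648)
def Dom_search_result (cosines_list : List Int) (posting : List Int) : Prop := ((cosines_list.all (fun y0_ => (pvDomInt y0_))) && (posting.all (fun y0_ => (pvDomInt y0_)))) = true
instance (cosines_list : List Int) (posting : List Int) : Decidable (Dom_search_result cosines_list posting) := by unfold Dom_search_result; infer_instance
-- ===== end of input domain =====

-- B groups postings by cosine value in one dict pass and walks the distinct keys sorted
-- descending, instead of A's sort-a-copy-then-rescan-for-indices loop (objective: simpler).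


-- ===== PORT A =====
-- the while loop; fuel (= initial length of sorted_cosines) only makes the recursion total,
-- each Python iteration removes at least one element so it is never exhausted on real runs
def searchLoopA (cosines_list posting : List Int) : Nat → List Int → List Int → List Int
  | _, [], result => result
  | 0, _ :: _, result => result
  | fuel + 1, v :: rest, result =>
      let indices := ((PySem.List.enumerate cosines_list).filter (fun p => decide (p.2 = v))).map (·.1)
      let doc_ids := indices.filterMap (fun i => PySem.List.pyGet? posting i)
      searchLoopA cosines_list posting fuel ((v :: rest).drop doc_ids.length) (result ++ doc_ids)

def search_result (cosines_list : List Int) (posting : List Int) : List Int :=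
  let sorted_cosines := PySem.List.sorted cosines_list (fun x => x) true
  searchLoopA cosines_list posting sorted_cosines.length sorted_cosines []

-- ===== PORT B =====
def search_result_alt (cosines_list : List Int) (posting : List Int) : List Int :=
  let groups := (cosines_list.zip posting).foldl
      (fun d p => d.modify p.1 [] (· ++ [p.2])) PySem.Dict.empty
  (PySem.List.sorted groups.keys (fun x => x) true).foldl
      (fun result c => result ++ groups.getD c []) []

-- ===== PRECONDITION & SPEC =====
-- Pre_ excludes exactly the inputs where A raises IndexError (posting shorter than cosines_list)
def Pre_search_result (cosines_list : List Int) (posting : List Int) : Prop :=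
  cosines_list.length ≤ posting.length
instance (cosines_list : List Int) (posting : List Int) : Decidable (Pre_search_result cosines_list posting) := by unfold Pre_search_result; infer_instance
def pvWitness_search_result : List Int × List Int := ([1, 3, 1, 2], [10, 20, 30, 40])


def Spec_search_result (cosines_list : List Int) (posting : List Int) (out : List Int) : Prop := out = search_result_alt cosines_list posting
instance (cosines_list : List Int) (posting : List Int) (out : List Int) : Decidable (Spec_search_result cosines_list posting out) := by unfold Spec_search_result; infer_instance

-- ===== CLAIM (what is proved, stated in full; the proofs are below) =====
def Claim_equal_search_result : Prop := ∀ (cosines_list : List Int) (posting : List Int), Dom_search_result cosines_list posting → Pre_search_result cosines_list posting → Spec_search_result cosines_list posting (search_result cosines_list posting)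

-- ===== LEMMAS AND PROOFS =====

def selPost (cos post : List Int) (v : Int) : List Int :=
  ((cos.zip post).filter (fun p => p.1 == v)).map (·.2)

def keyList : List Int → List Int
  | [] => []
  | v :: t => v :: keyList (t.filter (fun x => !(x == v)))
  termination_by s => s.length
  decreasing_by
    simp only [List.length_unattach, List.length_cons]
    exact Nat.lt_succ_of_le (le_trans (List.length_filter_le _ _) (by simp))

-- Lemma 1: the indices/doc_ids computation of A is the zip-filter selPost
theorem doc_eq (v : Int) (cos : List Int) : ∀ (post : List Int) (k : Nat), cos.length + k ≤ post.length →
    ((((PySem.List.enumerate cos (k : Int)).filter (fun p => decide (p.2 = v))).map (·.1)).filterMap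
        (fun i => PySem.List.pyGet? post i))
      = ((cos.zip (post.drop k)).filter (fun p => p.1 == v)).map (·.2) := by
  induction cos with
  | nil => intro post k h; simp [PySem.List.enumerate_nil]
  | cons c t ih =>
    intro post k h
    simp only [List.length_cons] at h
    have hk : k < post.length := by omega
    have hdrop : post.drop k = post[k] :: post.drop (k + 1) := List.drop_eq_getElem_cons hk
    have hget : PySem.List.pyGet? post (k : Int) = some post[k] := by
      rw [PySem.List.pyGet?_natCast]; simp [List.getElem?_eq_getElem hk]
    have hcast : ((k : Int) + 1) = ((k + 1 : Nat) : Int) := by push_cast; ring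
    rw [PySem.List.enumerate_cons, hdrop]
    simp only [List.filter_cons, List.zip_cons_cons]
    by_cases hc : c = v
    · have h1 : decide (((k : Int), c).2 = v) = true := by simp [hc]
      have h2 : ((c, post[k]).1 == v) = true := by simp [hc]
      simp only [h1, h2, if_true, List.map_cons, List.filterMap_cons, hget, List.map_cons]
      rw [hcast, ih post (k + 1) (by omega)]
    · have h1 : decide (((k : Int), c).2 = v) = false := by simp [hc]
      have h2 : ((c, post[k]).1 == v) = false := by simp [hc]
      simp only [h1, h2, Bool.false_eq_true, if_false]
      rw [hcast, ih post (k + 1) (by omega)]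

-- Lemma 2: selPost's length is the count of v in cos
theorem selPost_length (v : Int) (cos : List Int) : ∀ post : List Int, cos.length ≤ post.length →
    (selPost cos post v).length = cos.count v := by
  induction cos with
  | nil => intro post h; simp [selPost]
  | cons c t ih =>
    intro post h
    cases post with
    | nil => simp at h
    | cons p ps =>
      simp only [selPost, List.zip_cons_cons, List.filter_cons, List.count_cons]
      have := ih ps (by simpa using h)
      by_cases hc : c = v
      · subst hc; simp_all [selPost]
      · simp_all [selPost]

-- Lemma 3: dropping count v from a descending list whose elements are ≤ v = filtering out v
theorem drop_count_eq_filter (v : Int) (s : List Int) (hs : s.Pairwise (fun a b => b ≤ a))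
    (hb : ∀ x ∈ s, x ≤ v) : s.drop (s.count v) = s.filter (fun x => !(x == v)) := by
  induction s with
  | nil => simp
  | cons x t ih =>
    rw [List.pairwise_cons] at hs
    by_cases hx : x = v
    · subst hx
      simp only [List.count_cons, List.filter_cons, beq_self_eq_true, Bool.not_true,
        Bool.false_eq_true, if_false]
      exact ih hs.2 (fun y hy => le_trans (hs.1 y hy) (hb x (by simp)))
    · have hxv : x < v := lt_of_le_of_ne (hb x (by simp)) hx
      have hnot : v ∉ x :: t := by
        intro hmem
        rcases List.mem_cons.mp hmem with h | h
        · exact hx h.symm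
        · exact absurd (hs.1 v h) (by omega)
      rw [List.count_eq_zero.mpr hnot, List.drop_zero, List.filter_eq_self.mpr]
      intro y hy
      have : y ≠ v := by
        rcases List.mem_cons.mp hy with h | h
        · omega
        · have := hs.1 y h; omega
      simp [this]

-- membership in keyList
theorem mem_keyList (s : List Int) (y : Int) : y ∈ keyList s ↔ y ∈ s := by
  induction s using keyList.induct with
  | case1 => simp [keyList]
  | case2 v t ih =>
    simp only [List.unattach_filter, List.unattach_attach] at ih
    rw [keyList]
    simp only [List.mem_cons, ih, List.mem_filter]
    constructor
    · rintro (rfl | hf)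
      · left; rfl
      · right; exact hf.1
    · rintro (rfl | h)
      · left; rfl
      · by_cases hy : y = v
        · left; exact hy
        · right; exact ⟨h, by simp [hy]⟩

-- keyList of a descending list is strictly descending
theorem keyList_pairwise (s : List Int) (hs : s.Pairwise (fun a b => b ≤ a)) :
    (keyList s).Pairwise (fun a b => b < a) := by
  induction s using keyList.induct with
  | case1 => simp [keyList]
  | case2 v t ih =>
    simp only [List.unattach_filter, List.unattach_attach] at ih
    rw [keyList]
    rw [List.pairwise_cons] at hs ⊢
    refine ⟨?_, ih (List.Pairwise.sublist List.filter_sublist hs.2)⟩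
    intro y hy
    rw [mem_keyList, List.mem_filter] at hy
    have h1 := hs.1 y hy.1
    have h2 : y ≠ v := by simpa using hy.2
    omega

-- the A-loop computes the flatMap of selPost over keyList
theorem loopA_eq (cos post : List Int) (hpre : cos.length ≤ post.length) :
    ∀ (fuel : Nat) (s r : List Int), s.Pairwise (fun a b => b ≤ a) →
      (∀ u ∈ s, s.count u = cos.count u) → s.length ≤ fuel →
      searchLoopA cos post fuel s r = r ++ (keyList s).flatMap (selPost cos post) := by
  intro fuel
  induction fuel with
  | zero =>
    intro s r _ _ hlen
    have : s = [] := List.eq_nil_of_length_eq_zero (by omega)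
    subst this; simp [searchLoopA, keyList]
  | succ f ih =>
    intro s r hs hcount hlen
    cases s with
    | nil => simp [searchLoopA, keyList]
    | cons v rest =>
      rw [searchLoopA]
      have hdoc : (((PySem.List.enumerate cos (0 : Int)).filter (fun p => decide (p.2 = v))).map (·.1)).filterMap
          (fun i => PySem.List.pyGet? post i) = selPost cos post v := by
        have := doc_eq v cos post 0 (by omega)
        simpa [selPost] using this
      simp only [hdoc]
      have hcv : (v :: rest).count v = cos.count v := hcount v (by simp)
      have hlenv : (selPost cos post v).length = (v :: rest).count v := by
        rw [selPost_length v cos post hpre, hcv]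
      have hble : ∀ x ∈ v :: rest, x ≤ v := by
        intro x hx
        rcases List.mem_cons.mp hx with rfl | hx
        · exact le_refl x
        · exact (List.pairwise_cons.mp hs).1 x hx
      have hdrop : (v :: rest).drop (selPost cos post v).length
          = rest.filter (fun x => !(x == v)) := by
        rw [hlenv, drop_count_eq_filter v _ hs hble]
        simp
      rw [hdrop]
      have hpair' : (rest.filter (fun x => !(x == v))).Pairwise (fun a b => b ≤ a) :=
        List.Pairwise.sublist List.filter_sublist (List.pairwise_cons.mp hs).2
      have hcount' : ∀ u ∈ rest.filter (fun x => !(x == v)),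
          (rest.filter (fun x => !(x == v))).count u = cos.count u := by
        intro u hu
        rw [List.mem_filter] at hu
        have huv : u ≠ v := by simpa using hu.2
        have h1 : (rest.filter (fun x => !(x == v))).count u = rest.count u := by
          rw [List.count_filter]
          simp [huv]
        have h2 : (v :: rest).count u = rest.count u := by
          simp [Ne.symm huv]
        rw [h1, ← h2]
        exact hcount u (by simp [List.mem_cons, hu.1])
      have hlen' : (rest.filter (fun x => !(x == v))).length ≤ f := by
        have := List.length_filter_le (fun x => !(x == v)) rest
        simp only [List.length_cons] at hlen
        omega
      rw [ih _ _ hpair' hcount' hlen']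
      rw [show keyList (v :: rest) = v :: keyList (rest.filter (fun x => !(x == v))) from by
        rw [keyList]]
      simp [List.flatMap_cons]

theorem main_eq (cos post : List Int) (hpre : cos.length ≤ post.length) :
    search_result cos post = search_result_alt cos post := by
  -- A side
  have hA : search_result cos post
      = (keyList (PySem.List.sorted cos (fun x => x) true)).flatMap (selPost cos post) := by
    unfold search_result
    refine loopA_eq cos post hpre _ _ [] ?_ ?_ (le_refl _)
    · exact PySem.List.sorted_pairwise_rev cos (fun x => x)
    · intro u _
      exact (PySem.List.sorted_perm cos (fun x => x) true).count_eq u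
  -- B side
  unfold search_result_alt
  rw [PySem.List.foldl_append_eq_flatMap]
  have hsel : ∀ c : Int,
      (((cos.zip post).foldl (fun d p => d.modify p.1 [] (· ++ [p.2])) PySem.Dict.empty).getD c [])
        = selPost cos post c := by
    intro c
    rw [PySem.Dict.getD_foldl_modify_append]
    simp [selPost]
  have hkeys : ((cos.zip post).foldl (fun d p => d.modify p.1 [] (· ++ [p.2]))
      PySem.Dict.empty).keys = PySem.Set.ofList cos := by
    rw [PySem.Dict.keys_foldl_modify_key]
    rw [PySem.Dict.keys_empty, PySem.Set.update_nil_left, List.map_fst_zip hpre]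
  rw [hkeys]
  have hks : PySem.List.sorted (PySem.Set.ofList cos) (fun x => x) true
      = keyList (PySem.List.sorted cos (fun x => x) true) := by
    apply PySem.List.sorted_rev_eq_of_perm_of_pairwise_gt
    · rw [List.perm_ext_iff_of_nodup]
      · intro y
        rw [mem_keyList, PySem.List.mem_sorted, PySem.Set.mem_ofList]
      · exact (keyList_pairwise _
          (PySem.List.sorted_pairwise_rev cos (fun x => x))).imp (fun h => ne_of_gt h)
      · exact PySem.Set.nodup_ofList cos
    · exact keyList_pairwise _ (PySem.List.sorted_pairwise_rev cos (fun x => x))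
  rw [hks, hA]
  simp only [hsel]
  simp

-- ===== VERDICT (by name: the statement is the Claim_ definition above) =====
theorem search_result_spec : Claim_equal_search_result := by
  intro cosines_list posting _ hpre
  unfold Spec_search_result
  exact main_eq cosines_list posting hpre
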